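-- pv_equiv track=rewrite | github.com/INF1007-2021A/2021a-c01-ch4-supp-exercices-LucasBouchard1 | exercice.py | get_first_part_of_name
-- ===== SOURCE A (Python) =====
-- def get_first_part_of_name(name : str) -> str:
-- 	first_name = ""
-- 	for lettre in name:
-- 		ascii_ = ord(lettre)
-- 		if 64<ascii_<91 or 96<ascii_<123:
-- 			first_name+=lettre
-- 		else:
-- 			break
-- 	return first_name
-- ===== SOURCE B (Python) =====
-- import re
--
-- def get_first_part_of_name(name: str) -> str:
--     return re.match('[A-Za-z]*', name).group()
-- ===== Notes on version B (the rewrite author's own statement) =====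
-- stated objective: idiomatic
-- what changed: Replaces the explicit per-character loop with break and manual ord-range tests by a single greedy regex match of the leading ASCII-letter run.
import Mathlib
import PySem

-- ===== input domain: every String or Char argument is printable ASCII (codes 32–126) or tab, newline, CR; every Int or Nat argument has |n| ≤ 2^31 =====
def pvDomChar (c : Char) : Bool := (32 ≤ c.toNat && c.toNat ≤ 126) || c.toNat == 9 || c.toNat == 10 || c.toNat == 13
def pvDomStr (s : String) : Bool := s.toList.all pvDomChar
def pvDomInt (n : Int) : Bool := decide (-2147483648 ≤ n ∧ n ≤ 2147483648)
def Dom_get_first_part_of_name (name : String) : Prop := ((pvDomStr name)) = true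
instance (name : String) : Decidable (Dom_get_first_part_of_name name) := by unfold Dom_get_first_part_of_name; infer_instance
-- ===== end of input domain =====

-- B replaces A's explicit character loop with break by a greedy regex match of the
-- leading ASCII-letter run (idiomatic); same return value on every string.

-- ===== PORT A =====
-- A's for-loop with break, transcribed as structural recursion accumulating the prefix.
def pvLoopA : List Char → List Char
  | [] => []
  | c :: rest =>
    if (64 < c.toNat ∧ c.toNat < 91) ∨ (96 < c.toNat ∧ c.toNat < 123) then
      c :: pvLoopA rest
    else []

def get_first_part_of_name (name : String) : String :=
  String.mk (pvLoopA name.toList)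

-- ===== PORT B =====
-- Source B's re.match('[A-Za-z]*', name).group(): the greedy leading match of the class
-- [A-Za-z] is exactly the longest prefix of ASCII letters, i.e. takeWhile on the class.
def pvAsciiLetter (c : Char) : Bool :=
  ('A' ≤ c && c ≤ 'Z') || ('a' ≤ c && c ≤ 'z')

def get_first_part_of_name_alt (name : String) : String :=
  String.mk (name.toList.takeWhile pvAsciiLetter)

-- ===== PRECONDITION & SPEC =====
def Spec_get_first_part_of_name (name : String) (out : String) : Prop := out = get_first_part_of_name_alt name
instance (name : String) (out : String) : Decidable (Spec_get_first_part_of_name name out) := by unfold Spec_get_first_part_of_name; infer_instance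

-- ===== CLAIM (what is proved, stated in full; the proofs are below) =====
def Claim_equal_get_first_part_of_name : Prop := ∀ (name : String), Dom_get_first_part_of_name name → Spec_get_first_part_of_name name (get_first_part_of_name name)

-- ===== LEMMAS AND PROOFS =====
theorem pvPred_eq (c : Char) :
    (decide ((64 < c.toNat ∧ c.toNat < 91) ∨ (96 < c.toNat ∧ c.toNat < 123))) = pvAsciiLetter c := by
  simp only [pvAsciiLetter, ← Bool.decide_and, ← Bool.decide_or, decide_eq_decide, Char.le_def,
    UInt32.le_iff_toNat_le, Char.toNat]
  have hA : ('A'.val).toNat = 65 := rfl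
  have hZ : ('Z'.val).toNat = 90 := rfl
  have ha : ('a'.val).toNat = 97 := rfl
  have hz : ('z'.val).toNat = 122 := rfl
  omega

theorem pvLoopA_eq_takeWhile (l : List Char) : pvLoopA l = l.takeWhile pvAsciiLetter := by
  induction l with
  | nil => rfl
  | cons c rest ih =>
    rw [pvLoopA, List.takeWhile_cons, ← pvPred_eq c]
    by_cases h : (64 < c.toNat ∧ c.toNat < 91) ∨ (96 < c.toNat ∧ c.toNat < 123)
    · simp [h, ih]
    · simp [h]

-- ===== VERDICT (by name: the statement is the Claim_ definition above) =====
theorem get_first_part_of_name_spec : Claim_equal_get_first_part_of_name := by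
  intro name _
  unfold Spec_get_first_part_of_name get_first_part_of_name get_first_part_of_name_alt
  rw [pvLoopA_eq_takeWhile]
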